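-- pv_equiv track=rewrite | github.com/A-Nr/Reliable_UDP | checksum.py | udp_checksum
-- ===== SOURCE A (Python) =====
-- def udp_checksum(data):
--     size = len(data)
--     if (size % 2 != 0):  # If odd...
--         size -= 1
--         summation = ord(data[size])  # initialize the sum with the odd end byte
--     else:
--         summation = 0
--     for i in range(0, size, 2):
--         summation += (ord(data[i + 1]) << 8) + ord(data[i])
--     summation = (summation >> 16) + (summation & 0xffff)
--     return hex((~summation) & 0x0ffff)[2:]
-- ===== SOURCE B (Python) =====
-- def udp_checksum(data):
--     low = sum(ord(data[i]) for i in range(0, len(data), 2))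
--     high = sum(ord(data[i]) for i in range(1, len(data), 2))
--     summation = low + (high << 8)
--     summation = (summation >> 16) + (summation & 0xffff)
--     return hex((~summation) & 0xffff)[2:]
-- ===== Notes on version B (the rewrite author's own statement) =====
-- stated objective: simpler
-- what changed: Replaces the odd/even length branch and the manual pair-accumulating loop by two branch-free parity sums (even-index and odd-index ord sums) combined as low + (high << 8); the trailing byte of an odd-length input falls on an even index and is added unshifted, exactly matching A's odd-case seed.
import Mathlib
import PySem

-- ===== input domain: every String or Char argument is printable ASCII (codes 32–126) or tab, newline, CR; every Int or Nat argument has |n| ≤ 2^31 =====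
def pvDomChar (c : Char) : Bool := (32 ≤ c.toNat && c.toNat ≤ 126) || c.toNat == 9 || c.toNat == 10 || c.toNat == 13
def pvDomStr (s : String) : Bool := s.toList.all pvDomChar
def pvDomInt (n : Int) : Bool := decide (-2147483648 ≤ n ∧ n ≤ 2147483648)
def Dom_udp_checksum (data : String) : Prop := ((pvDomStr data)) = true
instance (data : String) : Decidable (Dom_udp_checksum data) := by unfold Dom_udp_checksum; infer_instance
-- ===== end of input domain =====

-- B replaces A's odd/even branch and pair-accumulating loop by two branch-free parity
-- sums combined as low + (high << 8) (objective: simpler).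

-- shared builtin ports: ord(data[i]) on an in-range index (the .getD 0 default is never
-- reached by either port's indices), and hex(n)[2:] for n ≥ 0 (exact there: lowercase,
-- no leading zeros, "0" for 0)
def pvOrdAt (cs : List Char) (i : Int) : Int :=
  ((PySem.List.pyGet? cs i).map (fun c => (c.toNat : Int))).getD 0

def pvHex (n : Int) : String := String.ofList (Nat.toDigits 16 n.toNat)

-- ===== PORT A =====
def udp_checksum (data : String) : String :=
  let cs := data.toList
  let size : Int := PySem.Str.len data
  let p : Int × Int :=
    if PySem.Int.mod size 2 ≠ 0 then (size - 1, pvOrdAt cs (size - 1)) else (size, 0)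
  let summation :=
    (PySem.List.pyRange 0 p.1 2).foldl
      (fun s i => s + ((pvOrdAt cs (i + 1)) <<< (8 : Nat) + pvOrdAt cs i)) p.2
  let summation := (summation >>> (16 : Nat)) + PySem.Int.band summation 0xffff
  pvHex (PySem.Int.band (Int.not summation) 0xffff)

-- ===== PORT B =====
def udp_checksum_alt (data : String) : String :=
  let cs := data.toList
  let low := ((PySem.List.pyRange 0 (PySem.Str.len data) 2).map (fun i => pvOrdAt cs i)).sum
  let high := ((PySem.List.pyRange 1 (PySem.Str.len data) 2).map (fun i => pvOrdAt cs i)).sum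
  let summation := low + (high <<< (8 : Nat))
  let summation := (summation >>> (16 : Nat)) + PySem.Int.band summation 0xffff
  pvHex (PySem.Int.band (Int.not summation) 0xffff)

-- ===== PRECONDITION & SPEC =====
def Spec_udp_checksum (data : String) (out : String) : Prop := out = udp_checksum_alt data
instance (data : String) (out : String) : Decidable (Spec_udp_checksum data out) := by unfold Spec_udp_checksum; infer_instance

-- ===== CLAIM (what is proved, stated in full; the proofs are below) =====
def Claim_equal_udp_checksum : Prop := ∀ (data : String), Dom_udp_checksum data → Spec_udp_checksum data (udp_checksum data)

-- ===== LEMMAS AND PROOFS =====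

-- Nat-indexed access and the even-index sum, structural
def pvOnat (cs : List Char) (n : Nat) : Int := (cs[n]?.map (fun c => (c.toNat : Int))).getD 0

def pvEsum : List Char → Int
  | [] => 0
  | [a] => (a.toNat : Int)
  | a :: _ :: t => (a.toNat : Int) + pvEsum t

theorem pvOrdAt_natCast (cs : List Char) (n : Nat) : pvOrdAt cs (n : Int) = pvOnat cs n := by
  simp [pvOrdAt, pvOnat, PySem.List.pyGet?_natCast]

theorem pvRangeE (n : Nat) :
    PySem.List.pyRange 0 (n : Int) 2 = (List.range ((n + 1) / 2)).map (fun k => ((2 * k : Nat) : Int)) := by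
  rw [PySem.List.pyRange_of_pos _ _ (by norm_num)]
  have hc : (if (0 : Int) < (n : Int) then (((n : Int) - 0 + 2 - 1) / 2).toNat else 0) = (n + 1) / 2 := by
    split_ifs with h <;> omega
  rw [hc]
  apply List.map_congr_left; intro k _; push_cast; ring

theorem pvRangeO (n : Nat) :
    PySem.List.pyRange 1 (n : Int) 2 = (List.range (n / 2)).map (fun k => ((2 * k + 1 : Nat) : Int)) := by
  rw [PySem.List.pyRange_of_pos _ _ (by norm_num)]
  have hc : (if (1 : Int) < (n : Int) then (((n : Int) - 1 + 2 - 1) / 2).toNat else 0) = n / 2 := by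
    split_ifs with h <;> omega
  rw [hc]
  apply List.map_congr_left; intro k _; push_cast; ring

theorem pvSumE : ∀ (cs : List Char),
    ((List.range ((cs.length + 1) / 2)).map (fun k => pvOnat cs (2 * k))).sum = pvEsum cs
  | [] => by simp [pvEsum]
  | [a] => by simp [pvEsum, pvOnat]
  | a :: b :: t => by
      have ih := pvSumE t
      have hl : ((a :: b :: t).length + 1) / 2 = (t.length + 1) / 2 + 1 := by
        simp only [List.length_cons]; omega
      rw [hl, List.range_succ_eq_map, List.map_cons, List.map_map, List.sum_cons]
      have hstep : ((List.range ((t.length + 1) / 2)).map ((fun k => pvOnat (a :: b :: t) (2 * k)) ∘ Nat.succ)).sum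
          = ((List.range ((t.length + 1) / 2)).map (fun k => pvOnat t (2 * k))).sum := by
        refine congrArg List.sum (List.map_congr_left fun k _ => ?_)
        have h2 : 2 * Nat.succ k = 2 * k + 1 + 1 := by omega
        simp [Function.comp, h2, pvOnat]
      rw [hstep, ih]
      simp [pvEsum, pvOnat]

theorem pvSumO : ∀ (cs : List Char),
    ((List.range (cs.length / 2)).map (fun k => pvOnat cs (2 * k + 1))).sum = pvEsum cs.tail
  | [] => by simp [pvEsum]
  | a :: t => by
      have hl : (a :: t).length / 2 = (t.length + 1) / 2 := by simp only [List.length_cons]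
      rw [hl]
      have hstep : ((List.range ((t.length + 1) / 2)).map (fun k => pvOnat (a :: t) (2 * k + 1))).sum
          = ((List.range ((t.length + 1) / 2)).map (fun k => pvOnat t (2 * k))).sum := by
        refine congrArg List.sum (List.map_congr_left fun k _ => ?_)
        simp [pvOnat]
      rw [hstep, pvSumE t]
      simp

-- A's loop total (seed + pair sum) equals B's parity decomposition
theorem pvPairSum (cs : List Char) (m : Nat) :
    ((List.range m).map ((fun i => pvOrdAt cs (i + 1) <<< (8 : Nat) + pvOrdAt cs i) ∘ (fun k => ((2 * k : Nat) : Int)))).sum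
    = 256 * ((List.range m).map (fun k => pvOnat cs (2 * k + 1))).sum
      + ((List.range m).map (fun k => pvOnat cs (2 * k))).sum := by
  have hfun : ((fun i => pvOrdAt cs (i + 1) <<< (8 : Nat) + pvOrdAt cs i) ∘ (fun k => ((2 * k : Nat) : Int)))
      = fun k => 256 * pvOnat cs (2 * k + 1) + pvOnat cs (2 * k) := by
    funext k
    have h1 : ((2 * k : Nat) : Int) + 1 = ((2 * k + 1 : Nat) : Int) := by push_cast; ring
    simp only [Function.comp]
    rw [h1, pvOrdAt_natCast, pvOrdAt_natCast, Int.shiftLeft_eq]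
    norm_num; ring
  rw [hfun, PySem.List.sum_map_add_int, List.sum_map_mul_left]

theorem pvA_eq (cs : List Char) (p : Int × Int)
    (hp : p = if PySem.Int.mod ((cs.length : Int)) 2 ≠ 0 then
        (((cs.length : Int)) - 1, pvOrdAt cs (((cs.length : Int)) - 1)) else (((cs.length : Int)), 0)) :
    (PySem.List.pyRange 0 p.1 2).foldl
      (fun s i => s + ((pvOrdAt cs (i + 1)) <<< (8 : Nat) + pvOrdAt cs i)) p.2
    = pvEsum cs + 256 * pvEsum cs.tail := by
  have hmod : PySem.Int.mod ((cs.length : Int)) 2 = ((cs.length % 2 : Nat) : Int) := by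
    exact_mod_cast PySem.Int.mod_natCast cs.length 2
  by_cases h : cs.length % 2 = 0
  · have hcond : ¬(PySem.Int.mod ((cs.length : Int)) 2 ≠ 0) := by rw [hmod]; simp [h]
    rw [hp, if_neg hcond]
    dsimp only
    rw [PySem.List.foldl_add, pvRangeE, List.map_map, pvPairSum]
    rw [show (cs.length + 1) / 2 = cs.length / 2 from by omega]
    have hE := pvSumE cs
    rw [show (cs.length + 1) / 2 = cs.length / 2 from by omega] at hE
    rw [pvSumO, hE]; ring
  · have hcond : PySem.Int.mod ((cs.length : Int)) 2 ≠ 0 := by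
      rw [hmod]; omega
    rw [hp, if_pos hcond]
    dsimp only
    have hlen : ((cs.length : Int)) - 1 = ((cs.length - 1 : Nat) : Int) := by omega
    rw [hlen, pvOrdAt_natCast, PySem.List.foldl_add, pvRangeE, List.map_map, pvPairSum]
    rw [show (cs.length - 1 + 1) / 2 = cs.length / 2 from by omega]
    have hE := pvSumE cs
    rw [show (cs.length + 1) / 2 = cs.length / 2 + 1 from by omega, List.range_succ,
        List.map_append, List.sum_append] at hE
    simp only [List.map_cons, List.map_nil, List.sum_cons, List.sum_nil, add_zero] at hE
    rw [show 2 * (cs.length / 2) = cs.length - 1 from by omega] at hE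
    rw [pvSumO]
    linarith

theorem pvB_low (cs : List Char) :
    ((PySem.List.pyRange 0 ((cs.length : Int)) 2).map (fun i => pvOrdAt cs i)).sum = pvEsum cs := by
  rw [pvRangeE, List.map_map]
  rw [show ((fun i => pvOrdAt cs i) ∘ fun k => ((2 * k : Nat) : Int)) = fun k => pvOnat cs (2 * k) from
    funext fun k => pvOrdAt_natCast cs (2 * k)]
  exact pvSumE cs

theorem pvB_high (cs : List Char) :
    ((PySem.List.pyRange 1 ((cs.length : Int)) 2).map (fun i => pvOrdAt cs i)).sum = pvEsum cs.tail := by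
  rw [pvRangeO, List.map_map]
  rw [show ((fun i => pvOrdAt cs i) ∘ fun k => ((2 * k + 1 : Nat) : Int)) = fun k => pvOnat cs (2 * k + 1) from
    funext fun k => pvOrdAt_natCast cs (2 * k + 1)]
  exact pvSumO cs

-- ===== VERDICT (by name: the statement is the Claim_ definition above) =====
theorem udp_checksum_spec : Claim_equal_udp_checksum := by
  intro data _
  unfold Spec_udp_checksum
  show udp_checksum data = udp_checksum_alt data
  simp only [udp_checksum, udp_checksum_alt, PySem.Str.len_eq]
  rw [pvA_eq data.toList _ rfl, pvB_low data.toList, pvB_high data.toList]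
  have hs : pvEsum data.toList + pvEsum data.toList.tail <<< (8 : Nat)
      = pvEsum data.toList + 256 * pvEsum data.toList.tail := by
    rw [Int.shiftLeft_eq]; ring
  rw [hs]
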